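-- pv_equiv track=rewrite | github.com/quietgong/AlgorithmNote | PROGRAMMERS/방금그곡.py | solution
-- ===== SOURCE A (Python) =====
-- def playing_time(start_time, finish_time):
--     finish_time = finish_time.split(":")
--     start_time = start_time.split(":")
--     play_time = (int(finish_time[0]) * 60 + int(finish_time[1])) - (int(start_time[0]) * 60 + int(start_time[1]))
--     return play_time
--
-- def solution(m, musicinfos):
--     answer = []
--     change = [['C#', 'c'], ['D#', 'd'], ['F#', 'f'], ['G#', 'g'], ['A#', 'a']]
--     for i in range(len(change)):
--         m = m.replace(change[i][0], change[i][1])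
--
--     for musicinfo in musicinfos:
--         playing_melody = ''
--         info = musicinfo.split(",")
--         start_time = info[0]
--         finish_time = info[1]
--         song_name = info[2]
--         melody = info[3]
--
--         for i in range(len(change)):
--             melody = melody.replace(change[i][0], change[i][1])
--
--         play_time = playing_time(start_time,finish_time)
--
--         for i in range(play_time):
--             i %= len(melody)
--             playing_melody += melody[i]
--         if m in playing_melody:
--             answer.append((song_name, play_time))
--
--     if len(answer) == 0:
--         return "(None)"
--     else:
--         answer.sort(key=lambda x: x[1], reverse=True)
--         return answer[0][0]
-- ===== SOURCE B (Python) =====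
-- CHANGE = (('C#', 'c'), ('D#', 'd'), ('F#', 'f'), ('G#', 'g'), ('A#', 'a'))
--
--
-- def _desharp(s):
--     for old, new in CHANGE:
--         s = s.replace(old, new)
--     return s
--
--
-- def _minutes(t):
--     p = t.split(":")
--     return int(p[0]) * 60 + int(p[1])
--
--
-- def solution(m, musicinfos):
--     m = _desharp(m)
--     best = None  # (name, play_time) of the best match so far
--     for info in musicinfos:
--         parts = info.split(",")
--         start, finish, name = parts[0], parts[1], parts[2]
--         melody = _desharp(parts[3])
--         pt = _minutes(finish) - _minutes(start)
--         if pt > 0: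
--             playing = melody * (pt // len(melody)) + melody[:pt % len(melody)]
--         else:
--             playing = ''
--         if m in playing and (best is None or pt > best[1]):
--             best = (name, pt)
--     return best[0] if best is not None else "(None)"
-- ===== Notes on version B (the rewrite author's own statement) =====
-- stated objective: simpler
-- what changed: B replaces A's collect-all-matches list + stable reverse sort + take-first pipeline with a single linear pass that keeps the best match (updating only on strictly larger play time, which reproduces the stable sort's earliest-tie behaviour), and builds the played melody by string repetition plus a slice instead of a character-by-character loop.
import Mathlib
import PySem

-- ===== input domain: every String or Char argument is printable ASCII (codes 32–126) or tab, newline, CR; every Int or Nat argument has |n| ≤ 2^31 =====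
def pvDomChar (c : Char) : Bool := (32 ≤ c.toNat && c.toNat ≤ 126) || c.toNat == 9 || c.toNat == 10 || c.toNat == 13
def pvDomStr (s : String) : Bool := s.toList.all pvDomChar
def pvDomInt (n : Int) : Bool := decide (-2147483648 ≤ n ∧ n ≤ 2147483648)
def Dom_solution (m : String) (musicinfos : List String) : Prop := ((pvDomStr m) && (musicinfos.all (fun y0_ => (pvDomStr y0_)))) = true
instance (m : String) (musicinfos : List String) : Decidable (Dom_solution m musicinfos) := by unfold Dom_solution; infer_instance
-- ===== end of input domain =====

-- B replaces A's collect-all-matches / stable-reverse-sort / take-first pipeline by a single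
-- linear pass keeping the best (strictly longer play time) match, and builds the played
-- melody by repetition + slice instead of a char-by-char loop.  Objective: simpler.


-- ===== PORT A =====
-- the `change` table, shared verbatim by both Pythons
def pvChange : List (List Char × List Char) :=
  [(['C','#'], ['c']), (['D','#'], ['d']), (['F','#'], ['f']), (['G','#'], ['g']), (['A','#'], ['a'])]

-- the sharp-replacement loop, identical in both Pythons
def pvDeSharp (s : List Char) : List Char :=
  pvChange.foldl (fun acc p => PySem.Chars.replace acc p.1 p.2) s

-- A's helper `playing_time`
def pvPlayingTime (start_time finish_time : List Char) : Int :=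
  let ft := (PySem.Chars.split? finish_time [':']).getD []
  let st := (PySem.Chars.split? start_time [':']).getD []
  ((PySem.Int.ofChars? (PySem.List.pyGetD ft 0 [])).getD 0 * 60
      + (PySem.Int.ofChars? (PySem.List.pyGetD ft 1 [])).getD 0)
    - ((PySem.Int.ofChars? (PySem.List.pyGetD st 0 [])).getD 0 * 60
      + (PySem.Int.ofChars? (PySem.List.pyGetD st 1 [])).getD 0)

def solution (m : String) (musicinfos : List String) : String :=
  let m' := pvDeSharp m.toList
  let answer := musicinfos.foldl (fun answer musicinfo =>
    let info := (PySem.Chars.split? musicinfo.toList [',']).getD []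
    let start_time := PySem.List.pyGetD info 0 []
    let finish_time := PySem.List.pyGetD info 1 []
    let song_name := PySem.List.pyGetD info 2 []
    let melody := pvDeSharp (PySem.List.pyGetD info 3 [])
    let play_time := pvPlayingTime start_time finish_time
    let playing_melody := (PySem.List.pyRange 0 play_time).foldl
      (fun acc i => acc ++ [PySem.List.pyGetD melody (PySem.Int.mod i (melody.length : Int)) ' ']) []
    if PySem.Chars.isIn m' playing_melody then answer ++ [(song_name, play_time)] else answer)
    ([] : List (List Char × Int))
  if answer.length = 0 then "(None)"
  else String.ofList (PySem.List.pyGetD (PySem.List.sorted answer (fun x => x.2) true) 0 ([], 0)).1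

-- ===== PORT B =====
-- B's helper `_minutes`
def pvMinutes (t : List Char) : Int :=
  let p := (PySem.Chars.split? t [':']).getD []
  (PySem.Int.ofChars? (PySem.List.pyGetD p 0 [])).getD 0 * 60
    + (PySem.Int.ofChars? (PySem.List.pyGetD p 1 [])).getD 0

def solution_alt (m : String) (musicinfos : List String) : String :=
  let m' := pvDeSharp m.toList
  let best := musicinfos.foldl (fun (best : Option (List Char × Int)) info =>
    let parts := (PySem.Chars.split? info.toList [',']).getD []
    let start := PySem.List.pyGetD parts 0 []
    let finish := PySem.List.pyGetD parts 1 []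
    let name := PySem.List.pyGetD parts 2 []
    let melody := pvDeSharp (PySem.List.pyGetD parts 3 [])
    let pt := pvMinutes finish - pvMinutes start
    let playing :=
      if 0 < pt then
        PySem.List.pyRepeat melody (PySem.Int.floordiv pt (melody.length : Int))
          ++ PySem.List.slice melody none (some (PySem.Int.mod pt (melody.length : Int)))
      else []
    if PySem.Chars.isIn m' playing && (best.isNone || decide ((best.getD ([], 0)).2 < pt)) then
      some (name, pt)
    else best) (none : Option (List Char × Int))
  match best with
  | some b => String.ofList b.1
  | none => "(None)"

-- ===== PRECONDITION & SPEC =====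
-- an "H:M" time field whose two parts int() accepts
def pvTimeOk (t : List Char) : Bool :=
  let p := (PySem.Chars.split? t [':']).getD []
  2 ≤ p.length && (PySem.Int.ofChars? (PySem.List.pyGetD p 0 [])).isSome
    && (PySem.Int.ofChars? (PySem.List.pyGetD p 1 [])).isSome

-- one musicinfo entry A processes without an exception
def pvInfoOk (s : String) : Bool :=
  let parts := (PySem.Chars.split? s.toList [',']).getD []
  4 ≤ parts.length && pvTimeOk (PySem.List.pyGetD parts 0 []) && pvTimeOk (PySem.List.pyGetD parts 1 [])
    && (!(pvDeSharp (PySem.List.pyGetD parts 3 [])).isEmpty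
        || decide (pvMinutes (PySem.List.pyGetD parts 1 []) - pvMinutes (PySem.List.pyGetD parts 0 []) ≤ 0))

-- Pre_ excludes exactly the inputs on which A raises: an entry with fewer than 4 comma fields
-- (IndexError), a time field without two int()-parsable ":"-parts (IndexError/ValueError),
-- or an empty melody together with a positive play time (ZeroDivisionError).
def Pre_solution (m : String) (musicinfos : List String) : Prop :=
  musicinfos.all pvInfoOk = true
instance (m : String) (musicinfos : List String) : Decidable (Pre_solution m musicinfos) := by
  unfold Pre_solution; infer_instance

def pvWitness_solution : String × List String :=
  ("ABCDEFG", ["12:00,12:14,HELLO,CDEFGAB", "13:00,13:05,WORLD,ABCDEF"])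

def Spec_solution (m : String) (musicinfos : List String) (out : String) : Prop := out = solution_alt m musicinfos
instance (m : String) (musicinfos : List String) (out : String) : Decidable (Spec_solution m musicinfos out) := by unfold Spec_solution; infer_instance

-- ===== CLAIM (what is proved, stated in full; the proofs are below) =====
def Claim_equal_solution : Prop := ∀ (m : String) (musicinfos : List String), Dom_solution m musicinfos → Pre_solution m musicinfos → Spec_solution m musicinfos (solution m musicinfos)

-- ===== LEMMAS AND PROOFS =====

-- A's playing_time is B's minutes difference
theorem pvPlayingTime_eq (st fin : List Char) :
    pvPlayingTime st fin = pvMinutes fin - pvMinutes st := rfl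

-- proof-side names for the two loop bodies and B's running-best update
def pvStepA (m' : List Char) (answer : List (List Char × Int)) (musicinfo : String) :
    List (List Char × Int) :=
  let info := (PySem.Chars.split? musicinfo.toList [',']).getD []
  let start_time := PySem.List.pyGetD info 0 []
  let finish_time := PySem.List.pyGetD info 1 []
  let song_name := PySem.List.pyGetD info 2 []
  let melody := pvDeSharp (PySem.List.pyGetD info 3 [])
  let play_time := pvPlayingTime start_time finish_time
  let playing_melody := (PySem.List.pyRange 0 play_time).foldl
    (fun acc i => acc ++ [PySem.List.pyGetD melody (PySem.Int.mod i (melody.length : Int)) ' ']) []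
  if PySem.Chars.isIn m' playing_melody then answer ++ [(song_name, play_time)] else answer

def pvUpd (b : Option (List Char × Int)) (p : List Char × Int) : Option (List Char × Int) :=
  if b.isNone || decide ((b.getD ([], 0)).2 < p.2) then some p else b

def pvStepB (m' : List Char) (best : Option (List Char × Int)) (info : String) :
    Option (List Char × Int) :=
  let parts := (PySem.Chars.split? info.toList [',']).getD []
  let start := PySem.List.pyGetD parts 0 []
  let finish := PySem.List.pyGetD parts 1 []
  let name := PySem.List.pyGetD parts 2 []
  let melody := pvDeSharp (PySem.List.pyGetD parts 3 [])
  let pt := pvMinutes finish - pvMinutes start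
  let playing :=
    if 0 < pt then
      PySem.List.pyRepeat melody (PySem.Int.floordiv pt (melody.length : Int))
        ++ PySem.List.slice melody none (some (PySem.Int.mod pt (melody.length : Int)))
    else []
  if PySem.Chars.isIn m' playing && (best.isNone || decide ((best.getD ([], 0)).2 < pt)) then
    some (name, pt)
  else best

theorem solution_eq (m : String) (musicinfos : List String) :
    solution m musicinfos =
      (let answer := musicinfos.foldl (pvStepA (pvDeSharp m.toList)) []
       if answer.length = 0 then "(None)"
       else String.ofList
         (PySem.List.pyGetD (PySem.List.sorted answer (fun x => x.2) true) 0 ([], 0)).1) := rfl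

theorem solution_alt_eq (m : String) (musicinfos : List String) :
    solution_alt m musicinfos =
      (match musicinfos.foldl (pvStepB (pvDeSharp m.toList)) none with
       | some b => String.ofList b.1
       | none => "(None)") := rfl

-- a prefix of the modular lookup table is a prefix of L
theorem pvMapModTake (L : List Char) (d : Char) (r : Nat) (hr : r ≤ L.length) :
    (List.range r).map (fun i => L.getD (i % L.length) d) = L.take r := by
  apply List.ext_getElem
  · simp [Nat.min_eq_left hr]
  · intro i h1 h2
    have hi : i < r := by simpa using h1
    have hiL : i < L.length := lt_of_lt_of_le hi hr
    simp [Nat.mod_eq_of_lt hiL, List.getD_eq_getElem?_getD, hiL]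

-- the modular lookup over a full range is repetition followed by a prefix
theorem pvMapMod (L : List Char) (d : Char) (q : Nat) :
    ∀ (r : Nat), r ≤ L.length →
      (List.range (L.length * q + r)).map (fun i => L.getD (i % L.length) d)
        = (List.replicate q L).flatten ++ L.take r := by
  induction q with
  | zero =>
    intro r hr
    simpa using pvMapModTake L d r hr
  | succ q ih =>
    intro r hr
    have hsplit : L.length * (q + 1) + r = L.length + (L.length * q + r) := by ring
    rw [hsplit, List.range_add, List.map_append, List.map_map]
    have h2 : (List.range (L.length * q + r)).map
        ((fun i => L.getD (i % L.length) d) ∘ (fun x => L.length + x))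
        = (List.replicate q L).flatten ++ L.take r := by
      rw [← ih r hr]
      apply List.map_congr_left
      intro i _
      simp [Function.comp, Nat.add_mod_left]
    rw [pvMapModTake L d L.length le_rfl, h2]
    simp [List.replicate_succ]

-- A's char-by-char melody loop equals B's repeat-plus-slice formula
theorem pvPlaying_eq (L : List Char) (pt : Int) (h : L ≠ [] ∨ pt ≤ 0) :
    (PySem.List.pyRange 0 pt).foldl
        (fun acc i => acc ++ [PySem.List.pyGetD L (PySem.Int.mod i (L.length : Int)) ' ']) []
      = (if 0 < pt then
          PySem.List.pyRepeat L (PySem.Int.floordiv pt (L.length : Int))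
            ++ PySem.List.slice L none (some (PySem.Int.mod pt (L.length : Int)))
        else []) := by
  by_cases hpt : 0 < pt
  · have hL : L ≠ [] := by
      rcases h with h | h
      · exact h
      · omega
    have hn : 0 < L.length := List.length_pos_iff.mpr hL
    obtain ⟨N, hN⟩ : ∃ N : Nat, pt = (N : Int) := ⟨pt.toNat, by omega⟩
    subst hN
    rw [if_pos hpt, PySem.List.foldl_append_singleton_eq_map, PySem.List.pyRange_zero_natCast,
      List.map_map, List.nil_append, PySem.Int.floordiv_natCast, PySem.Int.mod_natCast,
      PySem.List.slice_to_natCast]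
    have hfun : ((fun i => PySem.List.pyGetD L (PySem.Int.mod i (L.length : Int)) ' ')
          ∘ (fun k : Nat => (k : Int)))
        = fun k : Nat => L.getD (k % L.length) ' ' := by
      funext k
      simp only [Function.comp]
      rw [PySem.Int.mod_natCast, PySem.List.pyGetD_natCast]
    rw [hfun]
    set q := N / L.length with hq
    set r := N % L.length with hr
    have hdm : L.length * q + r = N := Nat.div_add_mod _ _
    rw [← hdm, pvMapMod L ' ' q r (le_of_lt (Nat.mod_lt _ hn))]
    simp [PySem.List.pyRepeat]
  · rw [if_neg hpt]
    have : PySem.List.pyRange 0 pt = [] := by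
      simp [PySem.List.pyRange]
      omega
    rw [this]
    rfl

-- the head of Python's stable reverse sort by play time is the running strict-max
theorem pvHeadSorted (l : List (List Char × Int)) :
    (PySem.List.sorted l (fun x => x.2) true).head? = l.foldl pvUpd none := by
  induction l using List.reverseRecOn with
  | nil => simp [PySem.List.sorted_rev_eq_foldl_insertBy]
  | append_singleton l x ih =>
    rw [PySem.List.sorted_rev_eq_foldl_insertBy, List.foldl_append, List.foldl_append,
      ← PySem.List.sorted_rev_eq_foldl_insertBy]
    simp only [List.foldl_cons, List.foldl_nil]
    cases hs : PySem.List.sorted l (fun x => x.2) true with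
    | nil =>
      rw [hs] at ih
      simp only [List.head?_nil] at ih
      rw [← ih]
      simp [PySem.List.insertBy, pvUpd]
    | cons h t =>
      rw [hs] at ih
      simp only [List.head?_cons] at ih
      rw [← ih]
      simp only [PySem.List.insertBy, pvUpd]
      by_cases hlt : h.2 < x.2
      · simp [hlt]
      · simp [hlt]

-- each loop step of B is the running-best update of the pair A appends (inside Pre_)
theorem pvStep_eq (m' : List Char) (b : Option (List Char × Int))
    (ans : List (List Char × Int)) (s : String) (hok : pvInfoOk s = true)
    (hb : b = ans.foldl pvUpd none) :
    pvStepB m' b s = (pvStepA m' ans s).foldl pvUpd none := by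
  simp only [pvInfoOk, Bool.and_eq_true, Bool.or_eq_true, Bool.not_eq_true',
    decide_eq_true_eq] at hok
  obtain ⟨⟨_, _⟩, hmel⟩ := hok
  simp only [pvStepA, pvStepB, pvPlayingTime_eq]
  set parts := (PySem.Chars.split? s.toList [',']).getD [] with hparts
  set melody := pvDeSharp (PySem.List.pyGetD parts 3 []) with hmeldef
  set pt := pvMinutes (PySem.List.pyGetD parts 1 []) - pvMinutes (PySem.List.pyGetD parts 0 [])
    with hptdef
  have hside : melody ≠ [] ∨ pt ≤ 0 := by
    rcases hmel with h | h
    · left; simpa [List.isEmpty_iff] using h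
    · right; exact h
  rw [← pvPlaying_eq melody pt hside]
  set c := PySem.Chars.isIn m' ((PySem.List.pyRange 0 pt).foldl
    (fun acc i => acc ++ [PySem.List.pyGetD melody (PySem.Int.mod i (melody.length : Int)) ' ']) [])
    with hc
  cases hcv : c with
  | false => simp [hb]
  | true =>
    simp only [Bool.true_and, if_true]
    rw [List.foldl_append]
    simp only [List.foldl_cons, List.foldl_nil]
    rw [← hb]
    rfl

-- the two folds stay synchronised over the whole list
theorem pvFoldSync (m' : List Char) (xs : List String)
    (hok : ∀ s ∈ xs, pvInfoOk s = true) :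
    ∀ (ans : List (List Char × Int)),
      xs.foldl (pvStepB m') (ans.foldl pvUpd none) = ((xs.foldl (pvStepA m') ans).foldl pvUpd none) := by
  induction xs with
  | nil => intro ans; rfl
  | cons s xs ih =>
    intro ans
    simp only [List.foldl_cons]
    rw [pvStep_eq m' _ ans s (hok s (by simp)) rfl]
    exact ih (fun t ht => hok t (by simp [ht])) (pvStepA m' ans s)

theorem solution_spec : Claim_equal_solution := by
  intro m musicinfos _hdom hpre
  unfold Spec_solution
  rw [solution_eq, solution_alt_eq]
  have hok : ∀ s ∈ musicinfos, pvInfoOk s = true := by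
    intro s hs
    exact List.all_eq_true.mp hpre s hs
  have hsync := pvFoldSync (pvDeSharp m.toList) musicinfos hok []
  simp only [List.foldl_nil] at hsync
  rw [hsync]
  cases hansv : musicinfos.foldl (pvStepA (pvDeSharp m.toList)) [] with
  | nil => rfl
  | cons a t =>
    have hsne : PySem.List.sorted (a :: t) (fun x : List Char × Int => x.2) true ≠ [] := by
      simp [PySem.List.sorted_eq_nil_iff]
    cases hsv : PySem.List.sorted (a :: t) (fun x : List Char × Int => x.2) true with
    | nil => exact absurd hsv hsne
    | cons h t2 =>
      have hh := pvHeadSorted (a :: t)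
      rw [hsv] at hh
      simp only [List.head?_cons] at hh
      rw [← hh]
      simp [hsv, PySem.List.pyGetD_ofNat']
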